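-- pv_equiv track=rewrite | github.com/pypi-data/pypi-mirror-371 | packages/noteparser/noteparser-2.1.2.tar.gz/noteparser-2.1.2/src/noteparser/converters/latex.py | _extract_template_variables
-- ===== SOURCE A (Python) =====
-- from typing import Any
--
-- def _extract_template_variables(metadata: dict[str, Any]) -> dict[str, str]:
--     """Extract variables for template population.
--
--     Args:
--         metadata: Document metadata
--
--     Returns:
--         Dictionary of template variables
--     """
--     variables = {
--         "title": metadata.get("title", "Document Title"),
--         "author": metadata.get("author", "Author Name"),
--         "date": metadata.get("date", "\\today"),
--         "course": metadata.get("course", ""),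
--         "topic": metadata.get("topic", ""),
--     }
--
--     # Clean LaTeX special characters
--     for key, value in variables.items():
--         if isinstance(value, str):
--             # Escape LaTeX special characters
--             value = value.replace("&", "\\&")
--             value = value.replace("%", "\\%")
--             value = value.replace("$", "\\$")
--             value = value.replace("#", "\\#")
--             value = value.replace("_", "\\_")
--             value = value.replace("{", "\\{")
--             value = value.replace("}", "\\}")
--             variables[key] = value
--
--     return variables
-- ===== SOURCE B (Python) =====
-- # Single pass with an accumulator: one character loop per value that conditionally
-- # prepends a backslash, instead of A's seven staged whole-string .replace passes.
-- _SPECIALS = "&%$#_{}"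
--
-- _DEFAULTS = (
--     ("title", "Document Title"),
--     ("author", "Author Name"),
--     ("date", "\\today"),
--     ("course", ""),
--     ("topic", ""),
-- )
--
--
-- def _extract_template_variables(metadata):
--     variables = {}
--     for key, default in _DEFAULTS:
--         value = metadata.get(key, default)
--         if isinstance(value, str):
--             buf = []
--             for ch in value:
--                 if ch in _SPECIALS:
--                     buf.append("\\")
--                 buf.append(ch)
--             value = "".join(buf)
--         variables[key] = value
--     return variables
-- ===== Notes on version B (the rewrite author's own statement) =====
-- stated objective: alternative
-- what changed: Each value is escaped in a single left-to-right character loop with an output accumulator (conditionally emitting a backslash before a special character) instead of seven staged whole-string .replace passes, and the result dict is built key by key from a defaults table instead of mutating a pre-built dict while iterating its items.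
import Mathlib
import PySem

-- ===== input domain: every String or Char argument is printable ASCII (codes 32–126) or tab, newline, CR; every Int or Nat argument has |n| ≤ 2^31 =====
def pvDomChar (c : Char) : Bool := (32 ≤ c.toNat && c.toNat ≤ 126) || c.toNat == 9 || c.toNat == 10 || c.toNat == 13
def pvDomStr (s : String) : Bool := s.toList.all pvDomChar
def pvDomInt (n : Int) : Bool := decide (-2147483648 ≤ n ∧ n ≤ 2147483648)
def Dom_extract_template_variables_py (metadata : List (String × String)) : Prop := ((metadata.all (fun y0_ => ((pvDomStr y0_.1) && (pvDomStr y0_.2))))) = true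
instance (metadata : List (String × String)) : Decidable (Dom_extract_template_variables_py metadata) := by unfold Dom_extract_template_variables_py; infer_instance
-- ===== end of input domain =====

-- B escapes each value in one left-to-right character loop with an output
-- accumulator (conditionally emitting a backslash) instead of A's seven staged
-- whole-string .replace passes, and builds the result dict key by key from a
-- defaults table instead of mutating a pre-built dict while iterating it (alternative).


-- ===== PORT A =====
-- the seven chained .replace calls of A's loop body
def pvEscapeA (s : String) : String :=
  let v := PySem.Str.replace s "&" "\\&"
  let v := PySem.Str.replace v "%" "\\%"
  let v := PySem.Str.replace v "$" "\\$"
  let v := PySem.Str.replace v "#" "\\#"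
  let v := PySem.Str.replace v "_" "\\_"
  let v := PySem.Str.replace v "{" "\\{"
  PySem.Str.replace v "}" "\\}"

def extract_template_variables_py (metadata : List (String × String)) : List (String × String) :=
  let md := PySem.Dict.ofList metadata
  let vars0 : PySem.Dict String String := PySem.Dict.ofList
    [("title", md.getD "title" "Document Title"),
     ("author", md.getD "author" "Author Name"),
     ("date", md.getD "date" "\\today"),
     ("course", md.getD "course" ""),
     ("topic", md.getD "topic" "")]
  -- for key, value in variables.items(): variables[key] = <escaped value>
  (vars0.items.foldl (fun v kv => v.insert kv.1 (pvEscapeA kv.2)) vars0).items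

-- ===== PORT B =====
-- 'for ch in value: if ch in _SPECIALS: buf.append("\\"); buf.append(ch)' then ''.join(buf)
-- ('ch in _SPECIALS' with a one-char ch is exactly character membership in the specials)
def pvEscapeB (s : String) : String :=
  String.ofList (s.toList.foldl
    (fun buf ch =>
      if ("&%$#_{}".toList).contains ch then buf ++ ['\\'] ++ [ch] else buf ++ [ch]) [])

def pvDefaults : List (String × String) :=
  [("title", "Document Title"), ("author", "Author Name"), ("date", "\\today"),
   ("course", ""), ("topic", "")]

def extract_template_variables_py_alt (metadata : List (String × String)) : List (String × String) :=
  let md := PySem.Dict.ofList metadata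
  (pvDefaults.foldl
    (fun vars kd => vars.insert kd.1 (pvEscapeB (md.getD kd.1 kd.2)))
    PySem.Dict.empty).items

-- ===== PRECONDITION & SPEC =====
def Spec_extract_template_variables_py (metadata : List (String × String)) (out : List (String × String)) : Prop := out = extract_template_variables_py_alt metadata
instance (metadata : List (String × String)) (out : List (String × String)) : Decidable (Spec_extract_template_variables_py metadata out) := by unfold Spec_extract_template_variables_py; infer_instance

-- ===== CLAIM (what is proved, stated in full; the proofs are below) =====
def Claim_equal_extract_template_variables_py : Prop := ∀ (metadata : List (String × String)), Dom_extract_template_variables_py metadata → Spec_extract_template_variables_py metadata (extract_template_variables_py metadata)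

-- ===== LEMMAS AND PROOFS =====

-- per-character effect of one single-char replace
def pvEsc1 (a : Char) (nw : List Char) (c : Char) : List Char := if c == a then nw else [c]

-- per-character effect of B's loop body
def pvEscChar (c : Char) : List Char :=
  if ("&%$#_{}".toList).contains c then ['\\', c] else [c]

theorem pv_go_single (a : Char) (nw : List Char) :
    ∀ fuel (l acc : List Char), l.length ≤ fuel →
      PySem.Chars.replace.go [a] nw fuel l acc = acc.reverse ++ l.flatMap (pvEsc1 a nw) := by
  intro fuel
  induction fuel with
  | zero => intro l acc h; simp at h; subst h; simp [PySem.Chars.replace.go]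
  | succ n ih =>
    intro l acc h
    cases l with
    | nil => simp [PySem.Chars.replace.go]
    | cons c t =>
      rw [PySem.Chars.replace.go]
      by_cases hc : c = a
      · subst hc
        simp [List.isPrefixOf, pvEsc1, ih t _ (by simpa using h)]
      · simp [List.isPrefixOf, hc, pvEsc1, ih t _ (by simpa using h), Ne.symm hc]

theorem pv_replace_single (a : Char) (nw : List Char) (cs : List Char) :
    PySem.Chars.replace cs [a] nw = cs.flatMap (pvEsc1 a nw) := by
  simp [PySem.Chars.replace, pv_go_single a nw cs.length cs [] le_rfl]

-- the seven chained single-char substitutions collapse to B's one-pass per-character escape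
theorem pv_chain_eq (cs : List Char) :
    ((((((cs.flatMap (pvEsc1 '&' ['\\', '&'])).flatMap (pvEsc1 '%' ['\\', '%'])).flatMap
      (pvEsc1 '$' ['\\', '$'])).flatMap (pvEsc1 '#' ['\\', '#'])).flatMap
      (pvEsc1 '_' ['\\', '_'])).flatMap (pvEsc1 '{' ['\\', '{'])).flatMap
      (pvEsc1 '}' ['\\', '}']) = cs.flatMap pvEscChar := by
  induction cs with
  | nil => rfl
  | cons c t ih =>
    simp only [List.flatMap_cons, List.flatMap_append] at ih ⊢
    rw [ih]
    congr 1
    by_cases h1 : c = '&'; · subst h1; decide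
    by_cases h2 : c = '%'; · subst h2; decide
    by_cases h3 : c = '$'; · subst h3; decide
    by_cases h4 : c = '#'; · subst h4; decide
    by_cases h5 : c = '_'; · subst h5; decide
    by_cases h6 : c = '{'; · subst h6; decide
    by_cases h7 : c = '}'; · subst h7; decide
    have e1 : (c == '&') = false := beq_eq_false_iff_ne.mpr h1
    have e2 : (c == '%') = false := beq_eq_false_iff_ne.mpr h2
    have e3 : (c == '$') = false := beq_eq_false_iff_ne.mpr h3
    have e4 : (c == '#') = false := beq_eq_false_iff_ne.mpr h4
    have e5 : (c == '_') = false := beq_eq_false_iff_ne.mpr h5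
    have e6 : (c == '{') = false := beq_eq_false_iff_ne.mpr h6
    have e7 : (c == '}') = false := beq_eq_false_iff_ne.mpr h7
    simp [pvEsc1, pvEscChar, e1, e2, e3, e4, e5, e6, e7]
    exact ⟨h1, h2, h3, h4, h5, h6, h7⟩

-- B's accumulator loop is the flatMap of its per-character body
theorem pv_loopB_eq (cs : List Char) :
    cs.foldl
      (fun buf ch =>
        if ("&%$#_{}".toList).contains ch then buf ++ ['\\'] ++ [ch] else buf ++ [ch]) []
    = cs.flatMap pvEscChar := by
  have h : ∀ (buf : List Char) (ch : Char),
      (if ("&%$#_{}".toList).contains ch then buf ++ ['\\'] ++ [ch] else buf ++ [ch])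
      = buf ++ pvEscChar ch := by
    intro buf ch; unfold pvEscChar; split <;> simp
  simp only [h]
  simpa using PySem.List.foldl_append_eq_flatMap (g := pvEscChar) (l := cs) (acc := [])

theorem pv_escape_eq (s : String) : pvEscapeA s = pvEscapeB s := by
  apply String.toList_injective
  simp only [pvEscapeA, pvEscapeB, PySem.Str.toList_replace, String.toList_ofList, pv_loopB_eq]
  rw [show ("&" : String).toList = ['&'] from rfl, show ("\\&" : String).toList = ['\\', '&'] from rfl,
      show ("%" : String).toList = ['%'] from rfl, show ("\\%" : String).toList = ['\\', '%'] from rfl,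
      show ("$" : String).toList = ['$'] from rfl, show ("\\$" : String).toList = ['\\', '$'] from rfl,
      show ("#" : String).toList = ['#'] from rfl, show ("\\#" : String).toList = ['\\', '#'] from rfl,
      show ("_" : String).toList = ['_'] from rfl, show ("\\_" : String).toList = ['\\', '_'] from rfl,
      show ("{" : String).toList = ['{'] from rfl, show ("\\{" : String).toList = ['\\', '{'] from rfl,
      show ("}" : String).toList = ['}'] from rfl, show ("\\}" : String).toList = ['\\', '}'] from rfl]
  simp only [pv_replace_single]
  exact pv_chain_eq s.toList

-- ===== VERDICT (by name: the statement is the Claim_ definition above) =====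
theorem extract_template_variables_py_spec : Claim_equal_extract_template_variables_py := by
  intro metadata _
  unfold Spec_extract_template_variables_py
  unfold extract_template_variables_py extract_template_variables_py_alt
  simp [PySem.Dict.ofList, PySem.Dict.update, PySem.Dict.insert, PySem.Dict.contains,
        PySem.Dict.empty, pvDefaults, pv_escape_eq]
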